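-- pv_equiv track=rewrite | github.com/JordanYHChan/AdventOfCode | 2025/Day2/main.py | is_repeated_invalid
-- ===== SOURCE A (Python) =====
-- def is_repeated_invalid(id_string):
--
--     length = len(id_string)
--
--     for i in range(3, length+1):
--         if length % i != 0:
--             continue
--
--         length_ = length // i
--
--         if len(set(id_string[length_ * n:length_ * (n+1)] for n in range(i))) == 1:
--             return True
--
--     return False
-- ===== SOURCE B (Python) =====
-- def is_repeated_invalid(id_string):
--     n = len(id_string)
--     for q in range(1, n // 3 + 1):
--         if n % q == 0 and id_string[q:] == id_string[:n - q]:
--             return True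
--     return False
-- ===== Notes on version B (the rewrite author's own statement) =====
-- stated objective: alternative
-- what changed: A tries each repetition count i, slices the string into i blocks and collects them into a set to test uniqueness; B instead tries each candidate block length q up to n//3 and tests periodicity with a single shifted self-comparison id_string[q:] == id_string[:n-q], with no block list or set at all.
import Mathlib
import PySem

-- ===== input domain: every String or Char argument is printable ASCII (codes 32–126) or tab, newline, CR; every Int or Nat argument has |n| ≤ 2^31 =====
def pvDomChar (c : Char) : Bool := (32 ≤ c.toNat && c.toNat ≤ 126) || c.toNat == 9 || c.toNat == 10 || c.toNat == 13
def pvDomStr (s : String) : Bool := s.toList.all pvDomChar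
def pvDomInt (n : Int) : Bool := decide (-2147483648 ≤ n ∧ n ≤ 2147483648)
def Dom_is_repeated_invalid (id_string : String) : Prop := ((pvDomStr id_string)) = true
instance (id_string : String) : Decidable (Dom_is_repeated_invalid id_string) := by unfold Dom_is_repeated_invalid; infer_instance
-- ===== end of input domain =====

-- B replaces A's divisor-count loop with blocks collected into a set by a direct
-- periodicity test (s[q:] == s[:n-q]) over candidate block lengths q ≤ n//3 (objective: alternative).

-- ===== PORT A =====
-- the generator 'id_string[length_*n : length_*(n+1)] for n in range(i)'
def pvASlices (cs : List Char) (length_ : Int) (i : Int) : List (List Char) :=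
  (PySem.List.pyRange 0 i).map
    (fun n => PySem.List.slice cs (some (length_ * n)) (some (length_ * (n + 1))))

-- the 'for i in range(3, length+1)' loop with its early return
def pvALoop (cs : List Char) (length : Int) : List Int → Bool
  | [] => false
  | i :: rest =>
    if PySem.Int.mod length i ≠ 0 then pvALoop cs length rest
    else if PySem.Set.len
        (PySem.Set.ofList (pvASlices cs (PySem.Int.floordiv length i) i)) = 1 then true
    else pvALoop cs length rest

def is_repeated_invalid (id_string : String) : Bool :=
  let length := PySem.Str.len id_string
  pvALoop id_string.toList length (PySem.List.pyRange 3 (length + 1))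

-- ===== PORT B =====
-- the 'for q in range(1, n//3 + 1)' loop with its early return
def pvBLoop (cs : List Char) (n : Int) : List Int → Bool
  | [] => false
  | q :: rest =>
    if PySem.Int.mod n q = 0 ∧
        PySem.List.slice cs (some q) none = PySem.List.slice cs none (some (n - q))
    then true
    else pvBLoop cs n rest

def is_repeated_invalid_alt (id_string : String) : Bool :=
  let n := PySem.Str.len id_string
  pvBLoop id_string.toList n (PySem.List.pyRange 1 (PySem.Int.floordiv n 3 + 1))

-- ===== PRECONDITION & SPEC =====
def Spec_is_repeated_invalid (id_string : String) (out : Bool) : Prop := out = is_repeated_invalid_alt id_string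
instance (id_string : String) (out : Bool) : Decidable (Spec_is_repeated_invalid id_string out) := by unfold Spec_is_repeated_invalid; infer_instance

-- ===== CLAIM (what is proved, stated in full; the proofs are below) =====
def Claim_equal_is_repeated_invalid : Prop := ∀ (id_string : String), Dom_is_repeated_invalid id_string → Spec_is_repeated_invalid id_string (is_repeated_invalid id_string)

-- ===== LEMMAS AND PROOFS =====

-- "cs is periodic with period q" — the common characterisation of both loop tests
def pvPeriodic (cs : List Char) (q : Nat) : Prop :=
  ∀ j : Nat, j + q < cs.length → cs[j + q]? = cs[j]?

def pvCondA (cs : List Char) (i : Nat) : Prop :=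
  3 ≤ i ∧ i ≤ cs.length ∧ i ∣ cs.length ∧ pvPeriodic cs (cs.length / i)

def pvCondB (cs : List Char) (q : Nat) : Prop :=
  1 ≤ q ∧ q ≤ cs.length / 3 ∧ q ∣ cs.length ∧ pvPeriodic cs q

-- A's loop returns true iff some i in the list passes both of A's tests
lemma pvALoop_iff (cs : List Char) (L : Int) (is : List Int) :
    pvALoop cs L is = true ↔
      ∃ i ∈ is, PySem.Int.mod L i = 0 ∧
        PySem.Set.len (PySem.Set.ofList (pvASlices cs (PySem.Int.floordiv L i) i)) = 1 := by
  induction is with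
  | nil => simp [pvALoop]
  | cons i rest ih =>
    simp only [pvALoop]
    split_ifs with h1 h2
    · rw [ih]
      constructor
      · rintro ⟨j, hj, hc⟩; exact ⟨j, List.mem_cons_of_mem _ hj, hc⟩
      · rintro ⟨j, hj, hc⟩
        rcases List.mem_cons.mp hj with rfl | hj'
        · exact absurd hc.1 h1
        · exact ⟨j, hj', hc⟩
    · constructor
      · intro _; exact ⟨i, List.mem_cons_self, not_not.mp h1, h2⟩
      · intro _; rfl
    · rw [ih]
      constructor
      · rintro ⟨j, hj, hc⟩; exact ⟨j, List.mem_cons_of_mem _ hj, hc⟩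
      · rintro ⟨j, hj, hc⟩
        rcases List.mem_cons.mp hj with rfl | hj'
        · exact absurd hc.2 h2
        · exact ⟨j, hj', hc⟩

-- B's loop returns true iff some q in the list passes B's test
lemma pvBLoop_iff (cs : List Char) (n : Int) (qs : List Int) :
    pvBLoop cs n qs = true ↔
      ∃ q ∈ qs, PySem.Int.mod n q = 0 ∧
        PySem.List.slice cs (some q) none = PySem.List.slice cs none (some (n - q)) := by
  induction qs with
  | nil => simp [pvBLoop]
  | cons q rest ih =>
    by_cases h : PySem.Int.mod n q = 0 ∧
        PySem.List.slice cs (some q) none = PySem.List.slice cs none (some (n - q))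
    · constructor
      · intro _; exact ⟨q, List.mem_cons_self, h⟩
      · intro _; simp [pvBLoop, h]
    · rw [show pvBLoop cs n (q :: rest) = pvBLoop cs n rest from by
          simp [pvBLoop, h], ih]
      constructor
      · rintro ⟨j, hj, hc⟩; exact ⟨j, List.mem_cons_of_mem _ hj, hc⟩
      · rintro ⟨j, hj, hc⟩
        rcases List.mem_cons.mp hj with rfl | hj'
        · exact absurd hc h
        · exact ⟨j, hj', hc⟩

-- a Nodup list whose elements all equal a, containing a, is [a]
lemma pvNodupAllEq {α : Type} (a : α) (s : List α) (hnd : s.Nodup)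
    (hall : ∀ x ∈ s, x = a) (hm : a ∈ s) : s = [a] := by
  cases s with
  | nil => cases hm
  | cons b u =>
    have hb : b = a := hall b (List.mem_cons_self)
    subst hb
    cases u with
    | nil => rfl
    | cons c v =>
      have hc : c = b := hall c (by simp)
      have : b ∉ c :: v := (List.nodup_cons.mp hnd).1
      exact absurd (by simp [hc]) this

-- len(set(l)) == 1 iff every element of l equals a given member a
lemma pvSetLenOneIff {α : Type} [BEq α] [LawfulBEq α] (l : List α) (a : α) (ha : a ∈ l) :
    PySem.Set.len (PySem.Set.ofList l) = 1 ↔ ∀ x ∈ l, x = a := by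
  have hlen : PySem.Set.len (PySem.Set.ofList l) = ((PySem.Set.ofList l).length : Int) := by
    simp [PySem.Set.len]
  rw [hlen]
  constructor
  · intro h x hx
    have h1 : (PySem.Set.ofList l).length = 1 := by exact_mod_cast h
    obtain ⟨b, hb⟩ := List.length_eq_one_iff.mp h1
    have hxb : x = b := by
      have := (PySem.Set.mem_ofList l x).mpr hx
      rw [hb] at this; simpa using this
    have hab : a = b := by
      have := (PySem.Set.mem_ofList l a).mpr ha
      rw [hb] at this; simpa using this
    rw [hxb, hab]
  · intro h
    have hs : PySem.Set.ofList l = [a] := by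
      apply pvNodupAllEq a _ (PySem.Set.nodup_ofList l)
      · intro x hx; exact h x ((PySem.Set.mem_ofList l x).mp hx)
      · exact (PySem.Set.mem_ofList l a).mpr ha
    rw [hs]; rfl

-- pointwise reading of "chunk k equals chunk 0"
lemma pvChunkEqIff (cs : List Char) (q k : Nat) (_hk : q * k + q ≤ cs.length) :
    (cs.drop (q * k)).take q = cs.take q ↔ ∀ r < q, cs[q * k + r]? = cs[r]? := by
  constructor
  · intro h r hr
    have h1 : ((cs.drop (q * k)).take q)[r]? = cs[q * k + r]? := by
      rw [List.getElem?_take]; simp [hr, List.getElem?_drop]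
    have h2 : (cs.take q)[r]? = cs[r]? := by
      rw [List.getElem?_take]; simp [hr]
    rw [← h1, h, h2]
  · intro h
    apply List.ext_getElem?
    intro r
    rw [List.getElem?_take, List.getElem?_take]
    by_cases hr : r < q
    · simp only [hr, if_pos, List.getElem?_drop]
      exact h r hr
    · simp [hr]

-- all i chunks of size q equal the first one  ⟺  cs is q-periodic (when len cs = q*i)
lemma pvChunksPeriodic (cs : List Char) (q i : Nat) (hq : 0 < q) (_hi : 0 < i)
    (hn : cs.length = q * i) :
    (∀ k < i, (cs.drop (q * k)).take q = cs.take q) ↔ pvPeriodic cs q := by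
  constructor
  · intro h j hj
    have hr : j % q < q := Nat.mod_lt _ hq
    have hjj : q * (j / q) + j % q = j := Nat.div_add_mod j q
    set k := j / q
    set r := j % q
    have hs1 : q * (k + 1) = q * k + q := Nat.mul_succ q k
    have hk1 : k + 1 < i := by
      have h1 : q * (k + 1) ≤ j + q := by omega
      have h2 : q * (k + 1) < q * i := lt_of_le_of_lt h1 (by rwa [hn] at hj)
      exact Nat.lt_of_mul_lt_mul_left h2
    have hb1 : q * (k + 1) + q ≤ cs.length := by
      rw [hn]
      calc q * (k + 1) + q = q * (k + 2) := by ring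
        _ ≤ q * i := Nat.mul_le_mul_left q (by omega)
    have hb0 : q * k + q ≤ cs.length := by omega
    have e1 := (pvChunkEqIff cs q (k + 1) hb1).mp (h (k + 1) hk1) r hr
    have e0 := (pvChunkEqIff cs q k hb0).mp (h k (by omega)) r hr
    rw [show j + q = q * (k + 1) + r by omega, e1, show j = q * k + r by omega, e0]
  · intro h
    suffices H : ∀ k, k < i → (cs.drop (q * k)).take q = cs.take q by exact H
    intro k
    induction k with
    | zero => intro _; simp
    | succ k ih =>
      intro hk
      have hs1 : q * (k + 1) = q * k + q := Nat.mul_succ q k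
      have hb1 : q * (k + 1) + q ≤ cs.length := by
        rw [hn]
        calc q * (k + 1) + q = q * (k + 2) := by ring
          _ ≤ q * i := Nat.mul_le_mul_left q (by omega)
      apply (pvChunkEqIff cs q (k + 1) hb1).mpr
      intro r hr
      have hb0 : q * k + q ≤ cs.length := by omega
      have ihr := (pvChunkEqIff cs q k hb0).mp (ih (by omega)) r hr
      have hper := h (q * k + r) (by omega)
      rw [show q * (k + 1) + r = q * k + r + q by omega, hper, ihr]

-- B's test  ⟺  cs is q-periodic
lemma pvDropTakePeriodic (cs : List Char) (q : Nat) (hq : q ≤ cs.length) :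
    cs.drop q = cs.take (cs.length - q) ↔ pvPeriodic cs q := by
  constructor
  · intro h j hj
    have h1 : (cs.drop q)[j]? = cs[q + j]? := List.getElem?_drop
    have h2 : (cs.take (cs.length - q))[j]? = cs[j]? := by
      rw [List.getElem?_take]
      simp [show j < cs.length - q by omega]
    rw [show j + q = q + j by omega, ← h1, h, h2]
  · intro h
    apply List.ext_getElem?
    intro j
    rw [List.getElem?_drop, List.getElem?_take]
    by_cases hj : j < cs.length - q
    · rw [if_pos hj, show q + j = j + q by omega]
      exact h j (by omega)
    · rw [if_neg hj, List.getElem?_eq_none (by omega)]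

-- A's set test, on natural arguments, is q-periodicity
lemma pvSlicesIff (cs : List Char) (q i : Nat) (hq : 0 < q) (hi : 3 ≤ i)
    (hn : cs.length = q * i) :
    PySem.Set.len (PySem.Set.ofList (pvASlices cs (q : Int) (i : Int))) = 1 ↔
      pvPeriodic cs q := by
  have hmap : pvASlices cs (q : Int) (i : Int) =
      (List.range i).map (fun k => (cs.drop (q * k)).take q) := by
    unfold pvASlices
    rw [PySem.List.pyRange_zero_nat, List.map_map]
    apply List.map_congr_left
    intro k _
    show PySem.List.slice cs (some ((q : Int) * (k : Int)))
        (some ((q : Int) * ((k : Int) + 1))) = _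
    have e1 : (q : Int) * (k : Int) = ((q * k : Nat) : Int) := by push_cast; ring
    have e2 : (q : Int) * ((k : Int) + 1) = ((q * k : Nat) : Int) + ((q : Nat) : Int) := by
      push_cast; ring
    rw [e1, e2, PySem.List.slice_natCast_add]
  rw [hmap]
  have h0mem : cs.take q ∈ (List.range i).map (fun k => (cs.drop (q * k)).take q) :=
    List.mem_map.mpr ⟨0, List.mem_range.mpr (by omega), by simp⟩
  rw [pvSetLenOneIff _ _ h0mem]
  constructor
  · intro h
    apply (pvChunksPeriodic cs q i hq (by omega) hn).mp
    intro k hk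
    exact h _ (List.mem_map.mpr ⟨k, List.mem_range.mpr hk, rfl⟩)
  · intro h x hx
    obtain ⟨k, hk, rfl⟩ := List.mem_map.mp hx
    exact (pvChunksPeriodic cs q i hq (by omega) hn).mpr h k (List.mem_range.mp hk)

lemma pvA_iff (s : String) :
    is_repeated_invalid s = true ↔ ∃ i : Nat, pvCondA s.toList i := by
  rw [show is_repeated_invalid s = pvALoop s.toList (PySem.Str.len s)
      (PySem.List.pyRange 3 (PySem.Str.len s + 1)) from rfl]
  rw [PySem.Str.len_eq, pvALoop_iff]
  set cs := s.toList with hcs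
  constructor
  · rintro ⟨i, hmem, hmod, hset⟩
    obtain ⟨h3, hlt⟩ := PySem.List.mem_pyRange_one.mp hmem
    lift i to ℕ using (by omega) with iN
    have h3' : 3 ≤ iN := by exact_mod_cast h3
    have hle : iN ≤ cs.length := by exact_mod_cast (by omega : (iN : Int) ≤ (cs.length : Int))
    rw [PySem.Int.mod_eq_zero_iff_dvd] at hmod
    have hdvd : iN ∣ cs.length := by exact_mod_cast hmod
    rw [PySem.Int.floordiv_natCast] at hset
    have hq : 0 < cs.length / iN :=
      (Nat.one_le_div_iff (by omega)).mpr hle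
    have hn : cs.length = cs.length / iN * iN := (Nat.div_mul_cancel hdvd).symm
    exact ⟨iN, h3', hle, hdvd,
      (pvSlicesIff cs (cs.length / iN) iN hq h3' hn).mp hset⟩
  · rintro ⟨iN, h3, hle, hdvd, hper⟩
    refine ⟨(iN : Int), PySem.List.mem_pyRange_one.mpr ⟨by exact_mod_cast h3, by
      have : (iN : Int) ≤ (cs.length : Int) := by exact_mod_cast hle
      omega⟩, (PySem.Int.mod_eq_zero_iff_dvd _ _).mpr (Int.natCast_dvd_natCast.mpr hdvd), ?_⟩
    rw [PySem.Int.floordiv_natCast]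
    have hq : 0 < cs.length / iN :=
      (Nat.one_le_div_iff (by omega)).mpr hle
    have hn : cs.length = cs.length / iN * iN := (Nat.div_mul_cancel hdvd).symm
    exact (pvSlicesIff cs (cs.length / iN) iN hq h3 hn).mpr hper

lemma pvB_iff (s : String) :
    is_repeated_invalid_alt s = true ↔ ∃ q : Nat, pvCondB s.toList q := by
  rw [show is_repeated_invalid_alt s = pvBLoop s.toList (PySem.Str.len s)
      (PySem.List.pyRange 1 (PySem.Int.floordiv (PySem.Str.len s) 3 + 1)) from rfl]
  rw [PySem.Str.len_eq, show (3 : Int) = ((3 : Nat) : Int) from rfl,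
    PySem.Int.floordiv_natCast, pvBLoop_iff]
  set cs := s.toList with hcs
  constructor
  · rintro ⟨q, hmem, hmod, hsl⟩
    obtain ⟨h1, hlt⟩ := PySem.List.mem_pyRange_one.mp hmem
    lift q to ℕ using (by omega) with qN
    have h1' : 1 ≤ qN := by exact_mod_cast h1
    have hle3 : qN ≤ cs.length / 3 := by
      exact_mod_cast (by omega : (qN : Int) ≤ ((cs.length / 3 : Nat) : Int))
    have hleN : qN ≤ cs.length := le_trans hle3 (Nat.div_le_self _ _)
    rw [PySem.Int.mod_eq_zero_iff_dvd] at hmod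
    have hdvd : qN ∣ cs.length := by exact_mod_cast hmod
    rw [PySem.List.slice_from_natCast,
      show ((cs.length : Int) - (qN : Int)) = ((cs.length - qN : Nat) : Int) by
        push_cast [Nat.cast_sub hleN]; ring,
      PySem.List.slice_to_natCast] at hsl
    exact ⟨qN, h1', hle3, hdvd, (pvDropTakePeriodic cs qN hleN).mp hsl⟩
  · rintro ⟨qN, h1, hle3, hdvd, hper⟩
    have hleN : qN ≤ cs.length := le_trans hle3 (Nat.div_le_self _ _)
    refine ⟨(qN : Int), PySem.List.mem_pyRange_one.mpr ⟨by exact_mod_cast h1, by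
      have : (qN : Int) ≤ ((cs.length / 3 : Nat) : Int) := by exact_mod_cast hle3
      omega⟩, (PySem.Int.mod_eq_zero_iff_dvd _ _).mpr (Int.natCast_dvd_natCast.mpr hdvd), ?_⟩
    rw [PySem.List.slice_from_natCast,
      show ((cs.length : Int) - (qN : Int)) = ((cs.length - qN : Nat) : Int) by
        push_cast [Nat.cast_sub hleN]; ring,
      PySem.List.slice_to_natCast]
    exact (pvDropTakePeriodic cs qN hleN).mpr hper

-- the divisor bijection i ↔ n / i
lemma pvKey (cs : List Char) : (∃ i, pvCondA cs i) ↔ (∃ q, pvCondB cs q) := by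
  constructor
  · rintro ⟨i, h3, hle, hdvd, hper⟩
    have hpos : 0 < cs.length := by omega
    refine ⟨cs.length / i, (Nat.one_le_div_iff (by omega)).mpr hle, ?_,
      Nat.div_dvd_of_dvd hdvd, hper⟩
    apply (Nat.le_div_iff_mul_le (by omega)).mpr
    calc cs.length / i * 3 ≤ cs.length / i * i :=
          Nat.mul_le_mul_left _ h3
      _ = cs.length := Nat.div_mul_cancel hdvd
  · rintro ⟨q, h1, hle3, hdvd, hper⟩
    have h3q : 3 * q ≤ cs.length := by
      have := (Nat.le_div_iff_mul_le (by omega)).mp hle3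
      omega
    have hpos : 0 < cs.length := by omega
    have hqpos : 0 < q := h1
    have hidvd : cs.length / q ∣ cs.length := Nat.div_dvd_of_dvd hdvd
    have hmul : q * (cs.length / q) = cs.length := Nat.mul_div_cancel' hdvd
    have hi3 : 3 ≤ cs.length / q := by
      by_contra hcon
      rw [not_le] at hcon
      have : cs.length < 3 * q := by
        calc cs.length = q * (cs.length / q) := hmul.symm
          _ ≤ q * 2 := Nat.mul_le_mul_left q (by omega)
          _ < 3 * q := by omega
      omega
    refine ⟨cs.length / q, hi3, Nat.div_le_self _ _, hidvd, ?_⟩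
    rw [Nat.div_div_self hdvd (by omega)]
    exact hper

-- ===== VERDICT (by name: the statement is the Claim_ definition above) =====
theorem is_repeated_invalid_spec : Claim_equal_is_repeated_invalid := by
  intro s _
  unfold Spec_is_repeated_invalid
  rw [Bool.eq_iff_iff, pvA_iff, pvB_iff]
  exact pvKey s.toList
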